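-- pv_equiv track=rewrite | github.com/JavierRubio4U/AI_agent_news_images_telegram | probar_flux.py | generar_prompt_simple
-- ===== SOURCE A (Python) =====
-- PERSONAS_IA = [
--     "Elon Musk", "Sam Altman", "Demis Hassabis", "Geoffrey Hinton", "Yann LeCun",
--     "Fei-Fei Li", "Andrew Ng", "Dario Amodei", "Ilya Sutskever", "Mark Zuckerberg",
--     "Emad Mostaque", "Jensen Huang", "Sundar Pichai", "Satya Nadella"
-- ]
--
-- EMPRESAS_IA = [
--     "OpenAI", "DeepMind", "Anthropic", "Stability AI", "Meta", "Google", "Microsoft",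
--     "Tesla", "NVIDIA", "Amazon", "Apple", "IBM", "Hugging Face", "Mistral AI", "Runway"
-- ]
--
-- def generar_prompt_simple(keywords: list[str]) -> str:
--     personas = [k for k in keywords if any(p.lower() in k.lower() for p in PERSONAS_IA)]
--     empresas = [k for k in keywords if any(e.lower() in k.lower() for e in EMPRESAS_IA)]
--     acciones = [k for k in keywords if k not in personas + empresas]
--
--     prompt = "A cinematic poster showing "
--     if personas:
--         prompt += f"{', '.join(personas)} in a dramatic pose, "
--     if empresas:
--         prompt += f"surrounded by logos of {' and '.join(empresas)}, "
--     if acciones: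
--         prompt += f"with themes of {' and '.join(acciones)}, "
--     prompt += "in the art style of GTA VI"
--     return prompt
-- ===== SOURCE B (Python) =====
-- PERSONAS_IA = [
--     "Elon Musk", "Sam Altman", "Demis Hassabis", "Geoffrey Hinton", "Yann LeCun",
--     "Fei-Fei Li", "Andrew Ng", "Dario Amodei", "Ilya Sutskever", "Mark Zuckerberg",
--     "Emad Mostaque", "Jensen Huang", "Sundar Pichai", "Satya Nadella"
-- ]
--
-- EMPRESAS_IA = [
--     "OpenAI", "DeepMind", "Anthropic", "Stability AI", "Meta", "Google", "Microsoft",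
--     "Tesla", "NVIDIA", "Amazon", "Apple", "IBM", "Hugging Face", "Mistral AI", "Runway"
-- ]
--
-- def generar_prompt_simple(keywords: list[str]) -> str:
--     personas_low = [p.lower() for p in PERSONAS_IA]
--     empresas_low = [e.lower() for e in EMPRESAS_IA]
--     personas, empresas, acciones = [], [], []
--     for k in keywords:
--         kl = k.lower()
--         es_p = any(p in kl for p in personas_low)
--         es_e = any(e in kl for e in empresas_low)
--         if es_p:
--             personas.append(k)
--         if es_e:
--             empresas.append(k)
--         if not (es_p or es_e):
--             acciones.append(k)
--     prompt = "A cinematic poster showing "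
--     if personas:
--         prompt += ", ".join(personas) + " in a dramatic pose, "
--     if empresas:
--         prompt += "surrounded by logos of " + " and ".join(empresas) + ", "
--     if acciones:
--         prompt += "with themes of " + " and ".join(acciones) + ", "
--     prompt += "in the art style of GTA VI"
--     return prompt
-- ===== Notes on version B (the rewrite author's own statement) =====
-- stated objective: alternative
-- what changed: A's three list comprehensions (the third re-scanning the concatenated personas+empresas list per keyword) are fused into a single pass that classifies each keyword once with precomputed lowercased constants, removing the per-keyword membership re-scan.
import Mathlib
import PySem

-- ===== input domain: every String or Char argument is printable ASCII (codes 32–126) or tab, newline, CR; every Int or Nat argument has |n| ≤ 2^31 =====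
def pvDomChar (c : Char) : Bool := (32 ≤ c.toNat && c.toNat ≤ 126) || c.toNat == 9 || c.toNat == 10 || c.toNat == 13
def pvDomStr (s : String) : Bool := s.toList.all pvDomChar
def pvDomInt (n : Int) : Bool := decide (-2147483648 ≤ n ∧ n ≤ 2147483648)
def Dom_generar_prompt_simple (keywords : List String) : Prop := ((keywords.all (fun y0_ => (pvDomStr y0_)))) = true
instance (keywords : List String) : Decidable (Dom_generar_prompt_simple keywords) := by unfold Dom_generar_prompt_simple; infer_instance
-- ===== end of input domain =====

-- B fuses A's three scans into one pass over keywords (and drops A's per-keyword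
-- 'k not in personas+empresas' list scan); same return value.

-- ===== PORT A =====
def personasIA : List String :=
  ["Elon Musk", "Sam Altman", "Demis Hassabis", "Geoffrey Hinton", "Yann LeCun",
   "Fei-Fei Li", "Andrew Ng", "Dario Amodei", "Ilya Sutskever", "Mark Zuckerberg",
   "Emad Mostaque", "Jensen Huang", "Sundar Pichai", "Satya Nadella"]

def empresasIA : List String :=
  ["OpenAI", "DeepMind", "Anthropic", "Stability AI", "Meta", "Google", "Microsoft",
   "Tesla", "NVIDIA", "Amazon", "Apple", "IBM", "Hugging Face", "Mistral AI", "Runway"]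

def generar_prompt_simple (keywords : List String) : String :=
  let personas := keywords.filter (fun k =>
    personasIA.any (fun p => PySem.Str.isIn (PySem.Str.lower p) (PySem.Str.lower k)))
  let empresas := keywords.filter (fun k =>
    empresasIA.any (fun e => PySem.Str.isIn (PySem.Str.lower e) (PySem.Str.lower k)))
  let acciones := keywords.filter (fun k => !((personas ++ empresas).contains k))
  let prompt := "A cinematic poster showing "
  let prompt := if personas ≠ [] then
      prompt ++ PySem.Str.join ", " personas ++ " in a dramatic pose, " else prompt
  let prompt := if empresas ≠ [] then
      prompt ++ "surrounded by logos of " ++ PySem.Str.join " and " empresas ++ ", " else prompt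
  let prompt := if acciones ≠ [] then
      prompt ++ "with themes of " ++ PySem.Str.join " and " acciones ++ ", " else prompt
  prompt ++ "in the art style of GTA VI"

-- ===== PORT B =====
def pvClassifyStep (personasLow empresasLow : List String)
    (acc : List String × List String × List String) (k : String) :
    List String × List String × List String :=
  let kl := PySem.Str.lower k
  let esP := personasLow.any (fun p => PySem.Str.isIn p kl)
  let esE := empresasLow.any (fun e => PySem.Str.isIn e kl)
  let acc := if esP then (acc.1 ++ [k], acc.2.1, acc.2.2) else acc
  let acc := if esE then (acc.1, acc.2.1 ++ [k], acc.2.2) else acc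
  if !(esP || esE) then (acc.1, acc.2.1, acc.2.2 ++ [k]) else acc

def generar_prompt_simple_alt (keywords : List String) : String :=
  let personasLow := personasIA.map PySem.Str.lower
  let empresasLow := empresasIA.map PySem.Str.lower
  let acc := keywords.foldl (pvClassifyStep personasLow empresasLow) ([], [], [])
  let personas := acc.1
  let empresas := acc.2.1
  let acciones := acc.2.2
  let prompt := "A cinematic poster showing "
  let prompt := if personas ≠ [] then
      prompt ++ PySem.Str.join ", " personas ++ " in a dramatic pose, " else prompt
  let prompt := if empresas ≠ [] then
      prompt ++ "surrounded by logos of " ++ PySem.Str.join " and " empresas ++ ", " else prompt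
  let prompt := if acciones ≠ [] then
      prompt ++ "with themes of " ++ PySem.Str.join " and " acciones ++ ", " else prompt
  prompt ++ "in the art style of GTA VI"

-- ===== PRECONDITION & SPEC =====
def Spec_generar_prompt_simple (keywords : List String) (out : String) : Prop := out = generar_prompt_simple_alt keywords
instance (keywords : List String) (out : String) : Decidable (Spec_generar_prompt_simple keywords out) := by unfold Spec_generar_prompt_simple; infer_instance

-- ===== CLAIM (what is proved, stated in full; the proofs are below) =====
def Claim_equal_generar_prompt_simple : Prop := ∀ (keywords : List String), Dom_generar_prompt_simple keywords → Spec_generar_prompt_simple keywords (generar_prompt_simple keywords)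

-- ===== LEMMAS AND PROOFS =====

def matchP (k : String) : Bool :=
  personasIA.any (fun p => PySem.Str.isIn (PySem.Str.lower p) (PySem.Str.lower k))
def matchE (k : String) : Bool :=
  empresasIA.any (fun e => PySem.Str.isIn (PySem.Str.lower e) (PySem.Str.lower k))

lemma classify_fold_eq (l : List String) (ps es ac : List String) :
    l.foldl (pvClassifyStep (personasIA.map PySem.Str.lower) (empresasIA.map PySem.Str.lower))
      (ps, es, ac) =
    (ps ++ l.filter matchP, es ++ l.filter matchE,
     ac ++ l.filter (fun k => !(matchP k || matchE k))) := by
  induction l generalizing ps es ac with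
  | nil => simp
  | cons k t ih =>
      have hP : (personasIA.map PySem.Str.lower).any
          (fun p => PySem.Str.isIn p (PySem.Str.lower k)) = matchP k := by
        simp [matchP, List.any_map, Function.comp_def]
      have hE : (empresasIA.map PySem.Str.lower).any
          (fun e => PySem.Str.isIn e (PySem.Str.lower k)) = matchE k := by
        simp [matchE, List.any_map, Function.comp_def]
      simp only [List.foldl_cons, pvClassifyStep, hP, hE]
      cases hp : matchP k <;> cases he : matchE k <;>
        simp [ih, hp, he]

lemma acciones_eq (keywords : List String) :
    keywords.filter (fun k =>
      !((keywords.filter matchP ++ keywords.filter matchE).contains k)) =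
    keywords.filter (fun k => !(matchP k || matchE k)) := by
  apply List.filter_congr
  intro k hk
  simp [List.mem_filter, hk]

theorem generar_prompt_simple_spec : Claim_equal_generar_prompt_simple := by
  intro keywords _
  show generar_prompt_simple keywords = generar_prompt_simple_alt keywords
  simp only [generar_prompt_simple, generar_prompt_simple_alt]
  rw [show (fun k => personasIA.any fun p => PySem.Str.isIn (PySem.Str.lower p) (PySem.Str.lower k)) = matchP from rfl]
  rw [show (fun k => empresasIA.any fun e => PySem.Str.isIn (PySem.Str.lower e) (PySem.Str.lower k)) = matchE from rfl]
  rw [classify_fold_eq, acciones_eq]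
  simp
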